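-- pv_equiv track=rewrite | github.com/iamkissg/nowcoder | companies/netease/2019秋招合集2/字母卡片.py | get_m_cards
-- ===== SOURCE A (Python) =====
-- def get_m_cards(alphabet, m):
--     counter = {}
--     for c in alphabet:
--         if c not in counter:
--             counter[c] = 0
--         counter[c] += 1
--     sorted_counter = sorted(counter.values(), reverse=True)
--
--     result = 0
--     for v in sorted_counter:
--         if m - v >= 0:
--             result += v * v
--             m -= v
--         else:
--             result += m * m
--             break
--     return result
-- ===== SOURCE B (Python) =====
-- def get_m_cards(alphabet, m):
--     counts = sorted((alphabet.count(c) for c in set(alphabet)), reverse=True)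
--     prefix = [0]
--     for v in counts:
--         prefix.append(prefix[-1] + v)
--     # binary search: largest k in [0, len(counts)] with prefix[k] <= m (k = 0 if none)
--     lo, hi = 0, len(counts)
--     while lo < hi:
--         mid = (lo + hi + 1) // 2
--         if prefix[mid] <= m:
--             lo = mid
--         else:
--             hi = mid - 1
--     k = lo
--     result = sum(v * v for v in counts[:k])
--     if k < len(counts):
--         result += (m - prefix[k]) ** 2
--     return result
-- ===== Notes on version B (the rewrite author's own statement) =====
-- stated objective: alternative
-- what changed: Replaces A's Python-level counting loop and sequential greedy loop with early break by str.count over the distinct letters, a prefix-sum array over the descending counts, and a binary search locating the number of fully drawn letter groups plus one closed-form partial term.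
import Mathlib
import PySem

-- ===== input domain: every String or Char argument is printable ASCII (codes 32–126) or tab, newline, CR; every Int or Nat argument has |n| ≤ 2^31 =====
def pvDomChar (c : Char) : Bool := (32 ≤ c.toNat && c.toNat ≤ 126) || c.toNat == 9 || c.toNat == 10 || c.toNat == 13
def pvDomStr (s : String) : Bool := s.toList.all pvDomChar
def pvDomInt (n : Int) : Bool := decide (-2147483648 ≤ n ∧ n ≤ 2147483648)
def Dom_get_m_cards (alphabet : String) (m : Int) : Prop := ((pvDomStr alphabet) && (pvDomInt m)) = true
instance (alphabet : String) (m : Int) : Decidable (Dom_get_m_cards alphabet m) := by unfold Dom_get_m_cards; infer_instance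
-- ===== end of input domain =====

-- B replaces A's sequential greedy loop (with early break) by prefix sums over the
-- descending counts plus a binary search for the number of fully taken counts —
-- an alternative decomposition of the same greedy answer (return value proved equal).


-- ===== PORT A =====
-- A's result loop: 'for v in sorted_counter: if m - v >= 0: …  else: …; break'
def aLoop : List Int → Int → Int → Int
  | [], result, _ => result
  | v :: vs, result, m => if m - v ≥ 0 then aLoop vs (result + v * v) (m - v) else result + m * m

def get_m_cards (alphabet : String) (m : Int) : Int :=
  let counter := alphabet.toList.foldl (fun d c =>
      let d := if d.contains c then d else d.insert c (0 : Int)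
      d.insert c (d.getD c 0 + 1)) PySem.Dict.empty
  let sorted_counter := PySem.List.sorted counter.values (fun x => x) true
  aLoop sorted_counter 0 m

-- ===== PORT B =====
-- Source B's while-loop binary search: largest k in [lo, hi] with pre[k] <= m (k = lo if none).
-- '(lo + hi + 1) / 2' on Nat is exact for Python's '(lo + hi + 1) // 2' (both operands nonnegative).
-- pre.getD mid 0 ports Python's pre[mid]: every probed index is in range (0 ≤ mid ≤ len(counts)).
def bSearch (pre : List Int) (m : Int) (lo hi : Nat) : Nat :=
  if lo < hi then
    let mid := (lo + hi + 1) / 2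
    if pre.getD mid 0 ≤ m then bSearch pre m mid hi else bSearch pre m lo (mid - 1)
  else lo
termination_by hi - lo
decreasing_by all_goals omega

def get_m_cards_alt (alphabet : String) (m : Int) : Int :=
  let counts := PySem.List.sorted
      ((PySem.Set.ofList alphabet.toList).map
        (fun c => (PySem.Str.count alphabet (String.ofList [c]) : Int)))
      (fun x => x) true
  let pre := counts.foldl (fun p v => p ++ [PySem.List.pyGetD p (-1) 0 + v]) [(0 : Int)]
  let k := bSearch pre m 0 counts.length
  let result := ((PySem.List.slice counts none (some (k : Int))).map (fun v => v * v)).sum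
  if k < counts.length then result + (m - pre.getD k 0) ^ 2 else result

-- ===== PRECONDITION & SPEC =====
def Spec_get_m_cards (alphabet : String) (m : Int) (out : Int) : Prop := out = get_m_cards_alt alphabet m
instance (alphabet : String) (m : Int) (out : Int) : Decidable (Spec_get_m_cards alphabet m out) := by unfold Spec_get_m_cards; infer_instance

-- ===== CLAIM (what is proved, stated in full; the proofs are below) =====
def Claim_equal_get_m_cards : Prop := ∀ (alphabet : String) (m : Int), Dom_get_m_cards alphabet m → Spec_get_m_cards alphabet m (get_m_cards alphabet m)

-- ===== LEMMAS AND PROOFS =====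

-- how many counts A's loop takes in full (the greedy k)
def gk : List Int → Int → Nat
  | [], _ => 0
  | v :: vs, m => if m - v ≥ 0 then gk vs (m - v) + 1 else 0

-- running prefix sums starting from s (models B's 'prefix' list after its head 0)
def psums (s : Int) : List Int → List Int
  | [] => []
  | v :: vs => (s + v) :: psums (s + v) vs

theorem gk_le_length (cs : List Int) (m : Int) : gk cs m ≤ cs.length := by
  induction cs generalizing m with
  | nil => simp [gk]
  | cons v vs ih =>
    simp only [gk, List.length_cons]
    split
    · exact Nat.succ_le_succ (ih _)
    · omega

theorem gk_sum_le (cs : List Int) (m : Int) (h : 0 < gk cs m) :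
    (cs.take (gk cs m)).sum ≤ m := by
  induction cs generalizing m with
  | nil => simp [gk] at h
  | cons v vs ih =>
    by_cases hv : m - v ≥ 0
    · simp only [gk, if_pos hv] at h ⊢
      by_cases hg : 0 < gk vs (m - v)
      · have := ih (m - v) hg
        simp only [List.take_succ_cons, List.sum_cons]
        omega
      · have h0 : gk vs (m - v) = 0 := by omega
        simp [h0]
        omega
    · simp only [gk, if_neg hv] at h
      omega

theorem gk_next_gt (cs : List Int) (m : Int) (h : gk cs m < cs.length) :
    m < (cs.take (gk cs m + 1)).sum := by
  induction cs generalizing m with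
  | nil => simp at h
  | cons v vs ih =>
    by_cases hv : m - v ≥ 0
    · simp only [gk, if_pos hv, List.length_cons] at h ⊢
      have h' : gk vs (m - v) < vs.length := by omega
      have := ih (m - v) h'
      simp only [List.take_succ_cons, List.sum_cons]
      omega
    · simp only [gk, if_neg hv]
      simp only [List.take_succ_cons, List.take_zero, List.sum_cons, List.sum_nil]
      omega

theorem sum_take_mono (cs : List Int) (hnn : ∀ v ∈ cs, 0 ≤ v) {j k : Nat} (hjk : j ≤ k) :
    (cs.take j).sum ≤ (cs.take k).sum := by
  have hk : k = j + (k - j) := by omega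
  rw [hk, List.take_add, List.sum_append]
  have hd : 0 ≤ ((cs.drop j).take (k - j)).sum := by
    apply List.sum_nonneg
    intro v hv
    exact hnn v (List.mem_of_mem_drop (List.mem_of_mem_take hv))
  omega

-- A's loop equals "sum of squares of the first (gk) counts, plus a partial square if any count is left"
theorem aLoop_eq (cs : List Int) (m r : Int) :
    aLoop cs r m = r + ((cs.take (gk cs m)).map (fun v => v * v)).sum +
      (if gk cs m < cs.length then (m - (cs.take (gk cs m)).sum) ^ 2 else 0) := by
  induction cs generalizing m r with
  | nil => simp [aLoop, gk]
  | cons v vs ih =>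
    by_cases hv : m - v ≥ 0
    · simp only [aLoop, gk, if_pos hv]
      rw [ih]
      simp only [List.take_succ_cons, List.map_cons, List.sum_cons, List.length_cons,
        Nat.add_lt_add_iff_right]
      split
      · ring_nf
      · ring
    · simp only [aLoop, gk, if_neg hv]
      simp only [List.take_zero, List.map_nil, List.sum_nil, List.length_cons]
      have h0 : (0 : Nat) < vs.length + 1 := by omega
      rw [if_pos h0]
      ring

theorem foldl_psums (cs : List Int) :
    ∀ (acc : List Int) (h : acc ≠ []),
      cs.foldl (fun p v => p ++ [PySem.List.pyGetD p (-1) 0 + v]) acc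
        = acc ++ psums (acc.getLast h) cs := by
  induction cs with
  | nil => intro acc h; simp [psums]
  | cons v vs ih =>
    intro acc h
    simp only [List.foldl_cons]
    rw [PySem.List.pyGetD_neg_one acc 0 h]
    have hne : acc ++ [acc.getLast h + v] ≠ [] := by simp
    rw [ih _ hne]
    have hl : (acc ++ [acc.getLast h + v]).getLast hne = acc.getLast h + v := by
      simp
    rw [hl]
    simp [psums]

theorem psums_getD (cs : List Int) :
    ∀ (s : Int) (k : Nat), k < cs.length →
      (psums s cs).getD k 0 = s + (cs.take (k + 1)).sum := by
  induction cs with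
  | nil => intro s k hk; simp at hk
  | cons v vs ih =>
    intro s k hk
    cases k with
    | zero => simp [psums]
    | succ j =>
      simp only [psums, List.getD_cons_succ]
      rw [ih (s + v) j (by simpa using hk)]
      simp only [List.take_succ_cons, List.sum_cons]
      ring

theorem pre_getD (cs : List Int) (k : Nat) (hk : k ≤ cs.length) :
    (0 :: psums 0 cs).getD k 0 = (cs.take k).sum := by
  cases k with
  | zero => simp
  | succ j =>
    simp only [List.getD_cons_succ]
    rw [psums_getD cs 0 j (by omega)]
    simp

theorem bSearch_eq_gk (cs : List Int) (m : Int) (hnn : ∀ v ∈ cs, 0 ≤ v) :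
    ∀ (N lo hi : Nat), hi - lo ≤ N → lo ≤ gk cs m → gk cs m ≤ hi → hi ≤ cs.length →
      bSearch (0 :: psums 0 cs) m lo hi = gk cs m := by
  intro N
  induction N with
  | zero =>
    intro lo hi hN hlo hhi hlen
    rw [bSearch]
    have : ¬ lo < hi := by omega
    simp only [this, if_false]
    omega
  | succ n ih =>
    intro lo hi hN hlo hhi hlen
    rw [bSearch]
    by_cases hlt : lo < hi
    · simp only [hlt, if_true]
      set mid := (lo + hi + 1) / 2 with hmid
      have hmid1 : lo + 1 ≤ mid := by omega
      have hmid2 : mid ≤ hi := by omega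
      have hmlen : mid ≤ cs.length := by omega
      rw [pre_getD cs mid hmlen]
      by_cases hc : (cs.take mid).sum ≤ m
      · simp only [hc, if_true]
        have hmg : mid ≤ gk cs m := by
          by_contra hcon
          have hglt : gk cs m < cs.length := by omega
          have h1 := gk_next_gt cs m hglt
          have h2 : (cs.take (gk cs m + 1)).sum ≤ (cs.take mid).sum :=
            sum_take_mono cs hnn (by omega)
          omega
        exact ih mid hi (by omega) hmg hhi hlen
      · simp only [hc, if_false]
        have hgm : gk cs m ≤ mid - 1 := by
          by_contra hcon
          have hmidg : mid ≤ gk cs m := by omega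
          have hpos : 0 < gk cs m := by omega
          have h1 := gk_sum_le cs m hpos
          have h2 : (cs.take mid).sum ≤ (cs.take (gk cs m)).sum :=
            sum_take_mono cs hnn (by omega)
          omega
        exact ih lo (mid - 1) (by omega) hlo hgm (by omega)
    · simp only [hlt, if_false]
      omega

-- go of Chars.count for a single-character needle counts that character
theorem count_go_single (c : Char) (cs : List Char) :
    ∀ (fuel acc : Nat), cs.length ≤ fuel →
      PySem.Chars.count.go [c] fuel cs acc = acc + cs.count c := by
  induction cs with
  | nil =>
    intro fuel acc _
    cases fuel <;> simp [PySem.Chars.count.go]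
  | cons h t ih =>
    intro fuel acc hf
    cases fuel with
    | zero => simp at hf
    | succ f =>
      rw [PySem.Chars.count.go]
      have hpre : List.isPrefixOf [c] (h :: t) = (c == h) := by
        simp [List.isPrefixOf]
      rw [hpre]
      by_cases hch : c = h
      · have hb : (c == h) = true := by simp [hch]
        simp only [hb, if_true]
        simp only [List.length_cons, List.length_nil, List.drop_succ_cons, List.drop_zero]
        rw [ih f (acc + 1) (by simpa using hf)]
        simp [List.count_cons, hch]
        omega
      · have hb : (c == h) = false := by simp [hch]
        simp only [hb, Bool.false_eq_true, if_false]
        rw [ih f acc (by simpa using hf)]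
        simp [List.count_cons]
        intro hh
        exact absurd hh.symm hch

theorem chars_count_single (cs : List Char) (c : Char) :
    PySem.Chars.count cs [c] = cs.count c := by
  rw [PySem.Chars.count]
  simp only [List.isEmpty_cons, if_false, Bool.false_eq_true]
  simpa using count_go_single c cs cs.length 0 (le_refl _)

-- A's counting loop builds exactly Counter(alphabet)
theorem aFold_eq_counter (cs : List Char) :
    cs.foldl (fun d c =>
      let d := if d.contains c then d else d.insert c (0 : Int)
      d.insert c (d.getD c 0 + 1)) PySem.Dict.empty = PySem.Dict.counter cs := by
  have hstep : (fun (d : PySem.Dict Char Int) c =>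
      let d := if d.contains c then d else d.insert c (0 : Int)
      d.insert c (d.getD c 0 + 1))
      = fun d c => d.insert c (d.getD c 0 + 1) := by
    funext d c
    by_cases hc : d.contains c
    · simp [hc]
    · simp only [hc, Bool.false_eq_true, if_false]
      rw [PySem.Dict.getD_insert_self, PySem.Dict.insert_insert_self,
        PySem.Dict.getD_of_not_contains d (0 : Int) (by simpa using hc)]
  rw [hstep]
  exact PySem.Dict.foldl_insert_getD_add_one_eq_counter cs

theorem counter_values (cs : List Char) :
    (PySem.Dict.counter cs).values
      = (PySem.Set.ofList cs).map (fun c => (cs.count c : Int)) := by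
  have h := PySem.Dict.items_counter cs
  simp only [PySem.Dict.values, h, List.map_map]
  rfl

-- the unsorted count lists of A and B coincide
theorem counts_agree (alphabet : String) :
    ((alphabet.toList.foldl (fun d c =>
        let d := if d.contains c then d else d.insert c (0 : Int)
        d.insert c (d.getD c 0 + 1)) PySem.Dict.empty).values)
      = (PySem.Set.ofList alphabet.toList).map
          (fun c => (PySem.Str.count alphabet (String.ofList [c]) : Int)) := by
  rw [aFold_eq_counter, counter_values]
  apply List.map_congr_left
  intro c _
  simp only [PySem.Str.count]
  rw [show (String.ofList [c]).toList = [c] by simp]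
  rw [chars_count_single]

-- ===== VERDICT (by name: the statement is the Claim_ definition above) =====
theorem get_m_cards_spec : Claim_equal_get_m_cards := by
  intro alphabet m _
  unfold Spec_get_m_cards
  simp only [get_m_cards, get_m_cards_alt]
  rw [← counts_agree alphabet]
  set counts := PySem.List.sorted
      ((alphabet.toList.foldl (fun d c =>
        let d := if d.contains c then d else d.insert c (0 : Int)
        d.insert c (d.getD c 0 + 1)) PySem.Dict.empty).values) (fun x => x) true with hcounts
  have hnn : ∀ v ∈ counts, 0 ≤ v := by
    intro v hv
    rw [hcounts, PySem.List.mem_sorted] at hv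
    rw [counts_agree alphabet] at hv
    rcases List.mem_map.mp hv with ⟨c, _, rfl⟩
    positivity
  have hpre : counts.foldl (fun p v => p ++ [PySem.List.pyGetD p (-1) 0 + v]) [(0 : Int)]
      = 0 :: psums 0 counts := by
    rw [foldl_psums counts [(0 : Int)] (by simp)]
    simp
  rw [hpre]
  have hg := gk_le_length counts m
  rw [bSearch_eq_gk counts m hnn (counts.length) 0 counts.length (by omega) (by omega) hg (le_refl _)]
  rw [PySem.List.slice_to_natCast counts (gk counts m)]
  rw [pre_getD counts (gk counts m) hg]
  rw [aLoop_eq counts m 0]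
  split_ifs <;> ring
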